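-- pv_equiv track=rewrite | github.com/Vimor123/advent-of-code-2024 | day08/task2.py | coords_for_antinodes
-- ===== SOURCE A (Python) =====
-- def coords_for_antinodes(constraints, antenna1, antenna2):
--     antenna_vector = (antenna2[0] - antenna1[0], antenna2[1] - antenna1[1])
--     coords_group = [antenna1]
--     exited1 = False
--     while not exited1:
--         new_coords1 = (coords_group[-1][0] - antenna_vector[0], coords_group[-1][1] - antenna_vector[1])
--         if new_coords1[0] in range(constraints[0]) and new_coords1[1] in range(constraints[1]):
--             coords_group.append(new_coords1)
--         else:
--             exited1 = True
--
--     coords_group.append(antenna2)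
--     exited2 = False
--     while not exited2:
--         new_coords2 = (coords_group[-1][0] + antenna_vector[0], coords_group[-1][1] + antenna_vector[1])
--         if new_coords2[0] in range(constraints[0]) and new_coords2[1] in range(constraints[1]):
--             coords_group.append(new_coords2)
--         else:
--             exited2 = True
--
--     return coords_group
-- ===== SOURCE B (Python) =====
-- def coords_for_antinodes(constraints, antenna1, antenna2):
--     c0, c1 = constraints
--     vx = antenna2[0] - antenna1[0]
--     vy = antenna2[1] - antenna1[1]
--
--     def axis_interval(x, d, c):
--         # integer interval (lo, hi) of i with 0 <= x + i*d < c; hi=None means unbounded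
--         if d == 0:
--             return (0, None) if 0 <= x < c else (1, 0)
--         if d > 0:
--             return (-(x // d), (c - 1 - x) // d)
--         return (-((c - 1 - x) // (-d)), x // (-d))
--
--     def run_length(x, y, dx, dy):
--         # largest k with (x + i*dx, y + i*dy) inside the box for every i = 1..k
--         lo0, hi0 = axis_interval(x, dx, c0)
--         lo1, hi1 = axis_interval(y, dy, c1)
--         lo = max(lo0, lo1)
--         if hi0 is None and hi1 is None:
--             return 0  # zero displacement: no further points generated
--         hi = hi1 if hi0 is None else (hi0 if hi1 is None else min(hi0, hi1))
--         return hi if lo <= 1 <= hi else 0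
--
--     k1 = run_length(antenna1[0], antenna1[1], -vx, -vy)
--     k2 = run_length(antenna2[0], antenna2[1], vx, vy)
--     return [(antenna1[0] - i * vx, antenna1[1] - i * vy) for i in range(k1 + 1)] + \
--            [(antenna2[0] + j * vx, antenna2[1] + j * vy) for j in range(k2 + 1)]
-- ===== Notes on version B (the rewrite author's own statement) =====
-- stated objective: alternative
-- what changed: Replaces A's two step-by-step while loops (walk along the antenna line until the first out-of-bounds point) by a closed-form computation of the two step counts via per-axis floor-division interval intersection, then builds the result with two range comprehensions.
import Mathlib
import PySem

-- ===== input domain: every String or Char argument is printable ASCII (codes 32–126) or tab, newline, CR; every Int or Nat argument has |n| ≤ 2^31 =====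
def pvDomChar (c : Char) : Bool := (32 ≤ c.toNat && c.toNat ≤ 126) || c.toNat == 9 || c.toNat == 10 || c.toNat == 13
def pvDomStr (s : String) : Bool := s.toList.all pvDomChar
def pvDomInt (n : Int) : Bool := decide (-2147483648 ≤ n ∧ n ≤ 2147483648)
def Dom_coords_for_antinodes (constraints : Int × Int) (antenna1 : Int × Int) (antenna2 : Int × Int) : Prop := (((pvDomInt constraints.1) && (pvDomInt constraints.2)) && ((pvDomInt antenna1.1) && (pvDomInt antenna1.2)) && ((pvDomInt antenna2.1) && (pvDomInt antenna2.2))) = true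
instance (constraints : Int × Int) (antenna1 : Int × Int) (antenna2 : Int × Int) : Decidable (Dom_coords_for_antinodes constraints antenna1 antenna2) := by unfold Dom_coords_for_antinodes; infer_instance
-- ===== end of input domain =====

-- B replaces A's two step-by-step while loops by a closed-form step-count computed
-- from per-axis floor-division bounds (objective: alternative/faster on large boxes).

-- ===== PORT A =====
-- membership test 'p[0] in range(c[0]) and p[1] in range(c[1])'
def pvInBox (c p : Int × Int) : Bool :=
  (decide (0 ≤ p.1) && decide (p.1 < c.1)) && (decide (0 ≤ p.2) && decide (p.2 < c.2))

-- termination measure for the first while loop (Python A diverges when v = (0,0)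
-- and the point stays inside the box; such inputs are excluded by Pre_ below)
def pvMeasD (c v cur : Int × Int) : Nat :=
  if 0 < v.1 then (cur.1 + 1).toNat
  else if v.1 < 0 then (c.1 - cur.1).toNat
  else if 0 < v.2 then (cur.2 + 1).toNat
  else (c.2 - cur.2).toNat

-- first while loop of A: keep stepping by -v while the new point is in the box.
-- The conjunct 'v ≠ (0,0)' is a totality guard only: with v = (0,0) and the point in
-- the box the Python loop never returns (outside Pre_), otherwise the guard is true.
def pvLoopDown (c v : Int × Int) (acc : List (Int × Int)) (cur : Int × Int) : List (Int × Int) :=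
  let nxt : Int × Int := (cur.1 - v.1, cur.2 - v.2)
  if h : pvInBox c nxt = true ∧ v ≠ (0, 0) then
    pvLoopDown c v (acc ++ [nxt]) nxt
  else acc
termination_by pvMeasD c v cur
decreasing_by
  simp only [pvInBox, Bool.and_eq_true, decide_eq_true_eq] at h
  obtain ⟨⟨⟨h1, h2⟩, h3, h4⟩, hv⟩ := h
  have hv' : v.1 ≠ 0 ∨ v.2 ≠ 0 := by
    by_contra hc
    simp only [not_or, not_not] at hc
    exact hv (Prod.ext_iff.mpr ⟨hc.1, hc.2⟩)
  have e1 : nxt.1 = cur.1 - v.1 := rfl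
  have e2 : nxt.2 = cur.2 - v.2 := rfl
  unfold pvMeasD
  split_ifs <;> omega

def pvMeasU (c v cur : Int × Int) : Nat :=
  if 0 < v.1 then (c.1 - cur.1).toNat
  else if v.1 < 0 then (cur.1 + 1).toNat
  else if 0 < v.2 then (c.2 - cur.2).toNat
  else (cur.2 + 1).toNat

-- second while loop of A: step by +v while in the box (same totality guard)
def pvLoopUp (c v : Int × Int) (acc : List (Int × Int)) (cur : Int × Int) : List (Int × Int) :=
  let nxt : Int × Int := (cur.1 + v.1, cur.2 + v.2)
  if h : pvInBox c nxt = true ∧ v ≠ (0, 0) then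
    pvLoopUp c v (acc ++ [nxt]) nxt
  else acc
termination_by pvMeasU c v cur
decreasing_by
  simp only [pvInBox, Bool.and_eq_true, decide_eq_true_eq] at h
  obtain ⟨⟨⟨h1, h2⟩, h3, h4⟩, hv⟩ := h
  have hv' : v.1 ≠ 0 ∨ v.2 ≠ 0 := by
    by_contra hc
    simp only [not_or, not_not] at hc
    exact hv (Prod.ext_iff.mpr ⟨hc.1, hc.2⟩)
  have e1 : nxt.1 = cur.1 + v.1 := rfl
  have e2 : nxt.2 = cur.2 + v.2 := rfl
  unfold pvMeasU
  split_ifs <;> omega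

def coords_for_antinodes (constraints : Int × Int) (antenna1 : Int × Int) (antenna2 : Int × Int) : List (Int × Int) :=
  let v : Int × Int := (antenna2.1 - antenna1.1, antenna2.2 - antenna1.2)
  let g1 := pvLoopDown constraints v [antenna1] antenna1
  pvLoopUp constraints v (g1 ++ [antenna2]) antenna2

-- ===== PORT B =====
-- integer interval (lo, hi) of i with 0 <= x + i*d < c; hi = none means unbounded
def pvAxisInterval (x d c : Int) : Int × Option Int :=
  if d = 0 then (if 0 ≤ x ∧ x < c then ((0 : Int), (none : Option Int)) else (1, some 0))
  else if 0 < d then (-(PySem.Int.floordiv x d), some (PySem.Int.floordiv (c - 1 - x) d))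
  else (-(PySem.Int.floordiv (c - 1 - x) (-d)), some (PySem.Int.floordiv x (-d)))

-- largest k with (x + i*dx, y + i*dy) in the box for every i = 1..k
def pvRunLength (c0 c1 x y dx dy : Int) : Int :=
  let p0 := pvAxisInterval x dx c0
  let p1 := pvAxisInterval y dy c1
  let lo := max p0.1 p1.1
  match p0.2, p1.2 with
  | none, none => 0
  | none, some h1 => if lo ≤ 1 ∧ 1 ≤ h1 then h1 else 0
  | some h0, none => if lo ≤ 1 ∧ 1 ≤ h0 then h0 else 0
  | some h0, some h1 => if lo ≤ 1 ∧ 1 ≤ min h0 h1 then min h0 h1 else 0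

def coords_for_antinodes_alt (constraints : Int × Int) (antenna1 : Int × Int) (antenna2 : Int × Int) : List (Int × Int) :=
  let vx := antenna2.1 - antenna1.1
  let vy := antenna2.2 - antenna1.2
  let k1 := pvRunLength constraints.1 constraints.2 antenna1.1 antenna1.2 (-vx) (-vy)
  let k2 := pvRunLength constraints.1 constraints.2 antenna2.1 antenna2.2 vx vy
  (PySem.List.pyRange 0 (k1 + 1) 1).map (fun i => (antenna1.1 - i * vx, antenna1.2 - i * vy))
    ++ (PySem.List.pyRange 0 (k2 + 1) 1).map (fun j => (antenna2.1 + j * vx, antenna2.2 + j * vy))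

-- ===== PRECONDITION & SPEC =====
-- Pre_ excludes exactly the inputs where Python A never returns: equal antennas whose
-- (shared) position lies inside the bounds box — there the zero displacement makes both
-- while loops run forever.
def Pre_coords_for_antinodes (constraints : Int × Int) (antenna1 : Int × Int) (antenna2 : Int × Int) : Prop :=
  ¬ (antenna1 = antenna2 ∧ 0 ≤ antenna1.1 ∧ antenna1.1 < constraints.1 ∧ 0 ≤ antenna1.2 ∧ antenna1.2 < constraints.2)
instance (constraints : Int × Int) (antenna1 : Int × Int) (antenna2 : Int × Int) : Decidable (Pre_coords_for_antinodes constraints antenna1 antenna2) := by unfold Pre_coords_for_antinodes; infer_instance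

def pvWitness_coords_for_antinodes : (Int × Int) × (Int × Int) × (Int × Int) := ((10, 10), (1, 1), (2, 3))

def Spec_coords_for_antinodes (constraints : Int × Int) (antenna1 : Int × Int) (antenna2 : Int × Int) (out : List (Int × Int)) : Prop := out = coords_for_antinodes_alt constraints antenna1 antenna2
instance (constraints : Int × Int) (antenna1 : Int × Int) (antenna2 : Int × Int) (out : List (Int × Int)) : Decidable (Spec_coords_for_antinodes constraints antenna1 antenna2 out) := by unfold Spec_coords_for_antinodes; infer_instance

-- ===== CLAIM (what is proved, stated in full; the proofs are below) =====
def Claim_equal_coords_for_antinodes : Prop := ∀ (constraints : Int × Int) (antenna1 : Int × Int) (antenna2 : Int × Int), Dom_coords_for_antinodes constraints antenna1 antenna2 → Pre_coords_for_antinodes constraints antenna1 antenna2 → Spec_coords_for_antinodes constraints antenna1 antenna2 (coords_for_antinodes constraints antenna1 antenna2)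

-- ===== LEMMAS AND PROOFS =====

def pvOptUB (i : Int) : Option Int → Prop
  | none => True
  | some h => i ≤ h

theorem pv_axis_iff (x d c i : Int) (h1 : 1 ≤ i) :
    ((pvAxisInterval x d c).1 ≤ i ∧ pvOptUB i (pvAxisInterval x d c).2) ↔
      (0 ≤ x + i * d ∧ x + i * d < c) := by
  unfold pvAxisInterval
  rcases lt_trichotomy d 0 with hd | hd | hd
  · simp only [if_neg (by omega : ¬ d = 0), if_neg (by omega : ¬ 0 < d), pvOptUB]
    have hpos : (0:Int) < -d := by omega
    have H1 : -i ≤ PySem.Int.floordiv (c - 1 - x) (-d) ↔ (-i) * (-d) ≤ c - 1 - x :=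
      PySem.Int.le_floordiv_iff_mul_le hpos
    have H2 : i ≤ PySem.Int.floordiv x (-d) ↔ i * (-d) ≤ x :=
      PySem.Int.le_floordiv_iff_mul_le hpos
    have e1 : (-i) * (-d) = i * d := by ring
    have e2 : i * (-d) = -(i * d) := by ring
    constructor
    · rintro ⟨ha, hb⟩
      have hA := H1.mp (by omega)
      have hB := H2.mp hb
      rw [e1] at hA; rw [e2] at hB
      constructor <;> linarith
    · rintro ⟨ha, hb⟩
      constructor
      · have hA := H1.mpr (by rw [e1]; linarith)
        omega
      · exact H2.mpr (by rw [e2]; linarith)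
  · subst hd
    rw [if_pos rfl]
    by_cases hbox : 0 ≤ x ∧ x < c
    · rw [if_pos hbox]
      simp only [pvOptUB, mul_zero]
      constructor
      · intro _; exact ⟨by omega, by omega⟩
      · intro _; exact ⟨by omega, trivial⟩
    · rw [if_neg hbox]
      simp only [pvOptUB, mul_zero]
      constructor
      · rintro ⟨ha, hb⟩; omega
      · intro hc; exact absurd ⟨by omega, by omega⟩ hbox
  · simp only [if_neg (by omega : ¬ d = 0), if_pos hd, pvOptUB]
    have H1 : -i ≤ PySem.Int.floordiv x d ↔ (-i) * d ≤ x :=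
      PySem.Int.le_floordiv_iff_mul_le hd
    have H2 : i ≤ PySem.Int.floordiv (c - 1 - x) d ↔ i * d ≤ c - 1 - x :=
      PySem.Int.le_floordiv_iff_mul_le hd
    have e1 : (-i) * d = -(i * d) := by ring
    constructor
    · rintro ⟨ha, hb⟩
      have hA := H1.mp (by omega)
      have hB := H2.mp hb
      rw [e1] at hA
      constructor <;> linarith
    · rintro ⟨ha, hb⟩
      refine ⟨?_, H2.mpr (by linarith)⟩
      have hA := H1.mpr (by rw [e1]; linarith)
      omega

theorem pv_axis_none (x d c : Int) (h : (pvAxisInterval x d c).2 = none) : d = 0 := by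
  by_contra hd
  unfold pvAxisInterval at h
  rw [if_neg hd] at h
  by_cases hp : 0 < d
  · rw [if_pos hp] at h; simp at h
  · rw [if_neg hp] at h; simp at h

theorem pv_run_spec (c0 c1 x y dx dy : Int) (hv : ¬ (dx = 0 ∧ dy = 0)) :
    0 ≤ pvRunLength c0 c1 x y dx dy ∧
    (∀ i : Int, 1 ≤ i → i ≤ pvRunLength c0 c1 x y dx dy →
      ((0 ≤ x + i * dx ∧ x + i * dx < c0) ∧ (0 ≤ y + i * dy ∧ y + i * dy < c1))) ∧
    ¬ ((0 ≤ x + (pvRunLength c0 c1 x y dx dy + 1) * dx ∧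
        x + (pvRunLength c0 c1 x y dx dy + 1) * dx < c0) ∧
       (0 ≤ y + (pvRunLength c0 c1 x y dx dy + 1) * dy ∧
        y + (pvRunLength c0 c1 x y dx dy + 1) * dy < c1)) := by
  have A0 : ∀ i : Int, 1 ≤ i →
      (((pvAxisInterval x dx c0).1 ≤ i ∧ pvOptUB i (pvAxisInterval x dx c0).2) ↔
        (0 ≤ x + i * dx ∧ x + i * dx < c0)) := fun i h => pv_axis_iff x dx c0 i h
  have A1 : ∀ i : Int, 1 ≤ i →
      (((pvAxisInterval y dy c1).1 ≤ i ∧ pvOptUB i (pvAxisInterval y dy c1).2) ↔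
        (0 ≤ y + i * dy ∧ y + i * dy < c1)) := fun i h => pv_axis_iff y dy c1 i h
  have N0 := pv_axis_none x dx c0
  have N1 := pv_axis_none y dy c1
  unfold pvRunLength
  rcases hc0 : pvAxisInterval x dx c0 with ⟨l0, o0⟩
  rcases hc1 : pvAxisInterval y dy c1 with ⟨l1, o1⟩
  rw [hc0] at A0 N0; rw [hc1] at A1 N1
  simp only [hc0, hc1]
  rcases o0 with _ | h0 <;> rcases o1 with _ | h1 <;> dsimp only
  · exact absurd ⟨N0 rfl, N1 rfl⟩ hv
  · -- o0 = none, o1 = some h1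
    simp only [pvOptUB] at A0 A1
    by_cases hcnd : max l0 l1 ≤ 1 ∧ 1 ≤ h1
    · rw [if_pos hcnd]
      refine ⟨by omega, ?_, ?_⟩
      · intro i hi1 hik
        exact ⟨(A0 i hi1).mp ⟨by omega, trivial⟩, (A1 i hi1).mp ⟨by omega, by omega⟩⟩
      · rintro ⟨hM0, hM1⟩
        have := ((A1 (h1 + 1) (by omega)).mpr hM1).2
        omega
    · rw [if_neg hcnd]
      refine ⟨le_refl 0, ?_, ?_⟩
      · intro i hi1 hik; omega
      · rintro ⟨hM0, hM1⟩
        have u0 := (A0 (0 + 1) (by omega)).mpr (by simpa using hM0)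
        have u1 := (A1 (0 + 1) (by omega)).mpr (by simpa using hM1)
        simp only [pvOptUB] at u0 u1
        omega
  · -- o0 = some h0, o1 = none
    simp only [pvOptUB] at A0 A1
    by_cases hcnd : max l0 l1 ≤ 1 ∧ 1 ≤ h0
    · rw [if_pos hcnd]
      refine ⟨by omega, ?_, ?_⟩
      · intro i hi1 hik
        exact ⟨(A0 i hi1).mp ⟨by omega, by omega⟩, (A1 i hi1).mp ⟨by omega, trivial⟩⟩
      · rintro ⟨hM0, hM1⟩
        have := ((A0 (h0 + 1) (by omega)).mpr hM0).2
        omega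
    · rw [if_neg hcnd]
      refine ⟨le_refl 0, ?_, ?_⟩
      · intro i hi1 hik; omega
      · rintro ⟨hM0, hM1⟩
        have u0 := (A0 (0 + 1) (by omega)).mpr (by simpa using hM0)
        have u1 := (A1 (0 + 1) (by omega)).mpr (by simpa using hM1)
        simp only [pvOptUB] at u0 u1
        omega
  · -- both some
    simp only [pvOptUB] at A0 A1
    by_cases hcnd : max l0 l1 ≤ 1 ∧ 1 ≤ min h0 h1
    · rw [if_pos hcnd]
      refine ⟨by omega, ?_, ?_⟩
      · intro i hi1 hik
        exact ⟨(A0 i hi1).mp ⟨by omega, by omega⟩, (A1 i hi1).mp ⟨by omega, by omega⟩⟩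
      · rintro ⟨hM0, hM1⟩
        have u0 := ((A0 (min h0 h1 + 1) (by omega)).mpr hM0).2
        have u1 := ((A1 (min h0 h1 + 1) (by omega)).mpr hM1).2
        omega
    · rw [if_neg hcnd]
      refine ⟨le_refl 0, ?_, ?_⟩
      · intro i hi1 hik; omega
      · rintro ⟨hM0, hM1⟩
        have u0 := (A0 (0 + 1) (by omega)).mpr (by simpa using hM0)
        have u1 := (A1 (0 + 1) (by omega)).mpr (by simpa using hM1)
        simp only [pvOptUB] at u0 u1
        omega

theorem pv_run_zero (c0 c1 x y : Int) : pvRunLength c0 c1 x y 0 0 = 0 := by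
  unfold pvRunLength pvAxisInterval
  by_cases h0 : 0 ≤ x ∧ x < c0 <;> by_cases h1 : 0 ≤ y ∧ y < c1 <;>
    simp [h0, h1]

theorem pv_loopDown_eq (c v a : Int × Int) (hv : v ≠ (0, 0)) (k : Nat)
    (hin : ∀ i : Nat, 1 ≤ i → i ≤ k →
      pvInBox c (a.1 - (i : Int) * v.1, a.2 - (i : Int) * v.2) = true)
    (hout : pvInBox c (a.1 - ((k : Int) + 1) * v.1, a.2 - ((k : Int) + 1) * v.2) = false) :
    ∀ (d m : Nat) (acc : List (Int × Int)), m + d = k →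
      pvLoopDown c v acc (a.1 - (m : Int) * v.1, a.2 - (m : Int) * v.2) =
        acc ++ (List.range d).map
          (fun j => (a.1 - ((m + 1 + j : Nat) : Int) * v.1,
                     a.2 - ((m + 1 + j : Nat) : Int) * v.2)) := by
  intro d
  induction d with
  | zero =>
    intro m acc hm
    have hmk : m = k := by omega
    subst hmk
    rw [pvLoopDown, dif_neg]
    · simp
    · rintro ⟨hb, -⟩
      dsimp only at hb
      have e1 : a.1 - (m : Int) * v.1 - v.1 = a.1 - ((m : Int) + 1) * v.1 := by ring
      have e2 : a.2 - (m : Int) * v.2 - v.2 = a.2 - ((m : Int) + 1) * v.2 := by ring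
      rw [e1, e2, hout] at hb
      exact Bool.noConfusion hb
  | succ n ih =>
    intro m acc hm
    have e1 : a.1 - (m : Int) * v.1 - v.1 = a.1 - ((m + 1 : Nat) : Int) * v.1 := by
      push_cast; ring
    have e2 : a.2 - (m : Int) * v.2 - v.2 = a.2 - ((m + 1 : Nat) : Int) * v.2 := by
      push_cast; ring
    rw [pvLoopDown, dif_pos]
    · dsimp only
      rw [e1, e2,
        ih (m + 1) (acc ++ [(a.1 - ((m + 1 : Nat) : Int) * v.1,
                             a.2 - ((m + 1 : Nat) : Int) * v.2)]) (by omega)]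
      rw [List.range_succ_eq_map]
      simp only [List.map_cons, List.map_map, List.append_assoc, List.singleton_append,
        List.cons_append, List.nil_append]
      congr 1
      simp only [List.cons.injEq]
      constructor
      · norm_num
      · apply List.map_congr_left
        intro j _
        simp only [Function.comp_apply, Nat.succ_eq_add_one]
        rw [Prod.mk.injEq]
        constructor <;> (push_cast; ring_nf)
    · constructor
      · dsimp only
        rw [e1, e2]
        exact hin (m + 1) (by omega) (by omega)
      · exact hv

theorem pv_loopDown_run (c v a : Int × Int) (hv : v ≠ (0, 0)) (k : Nat)
    (hin : ∀ i : Nat, 1 ≤ i → i ≤ k →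
      pvInBox c (a.1 - (i : Int) * v.1, a.2 - (i : Int) * v.2) = true)
    (hout : pvInBox c (a.1 - ((k : Int) + 1) * v.1, a.2 - ((k : Int) + 1) * v.2) = false) :
    pvLoopDown c v [a] a =
      (List.range (k + 1)).map
        (fun i : Nat => (a.1 - (i : Int) * v.1, a.2 - (i : Int) * v.2)) := by
  have h0 : pvLoopDown c v [a] a =
      pvLoopDown c v [a] (a.1 - ((0 : Nat) : Int) * v.1, a.2 - ((0 : Nat) : Int) * v.2) := by
    norm_num
  rw [h0, pv_loopDown_eq c v a hv k hin hout k 0 [a] (by omega)]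
  rw [List.range_succ_eq_map]
  simp only [List.map_cons, List.map_map, List.singleton_append]
  congr 1
  · norm_num
  · apply List.map_congr_left
    intro j _
    simp only [Function.comp_apply, Nat.succ_eq_add_one]
    rw [Prod.mk.injEq]
    constructor <;> (push_cast; ring_nf)

theorem pv_loopUp_eq (c v a : Int × Int) (hv : v ≠ (0, 0)) (k : Nat)
    (hin : ∀ i : Nat, 1 ≤ i → i ≤ k →
      pvInBox c (a.1 + (i : Int) * v.1, a.2 + (i : Int) * v.2) = true)
    (hout : pvInBox c (a.1 + ((k : Int) + 1) * v.1, a.2 + ((k : Int) + 1) * v.2) = false) :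
    ∀ (d m : Nat) (acc : List (Int × Int)), m + d = k →
      pvLoopUp c v acc (a.1 + (m : Int) * v.1, a.2 + (m : Int) * v.2) =
        acc ++ (List.range d).map
          (fun j => (a.1 + ((m + 1 + j : Nat) : Int) * v.1,
                     a.2 + ((m + 1 + j : Nat) : Int) * v.2)) := by
  intro d
  induction d with
  | zero =>
    intro m acc hm
    have hmk : m = k := by omega
    subst hmk
    rw [pvLoopUp, dif_neg]
    · simp
    · rintro ⟨hb, -⟩
      dsimp only at hb
      have e1 : a.1 + (m : Int) * v.1 + v.1 = a.1 + ((m : Int) + 1) * v.1 := by ring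
      have e2 : a.2 + (m : Int) * v.2 + v.2 = a.2 + ((m : Int) + 1) * v.2 := by ring
      rw [e1, e2, hout] at hb
      exact Bool.noConfusion hb
  | succ n ih =>
    intro m acc hm
    have e1 : a.1 + (m : Int) * v.1 + v.1 = a.1 + ((m + 1 : Nat) : Int) * v.1 := by
      push_cast; ring
    have e2 : a.2 + (m : Int) * v.2 + v.2 = a.2 + ((m + 1 : Nat) : Int) * v.2 := by
      push_cast; ring
    rw [pvLoopUp, dif_pos]
    · dsimp only
      rw [e1, e2,
        ih (m + 1) (acc ++ [(a.1 + ((m + 1 : Nat) : Int) * v.1,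
                             a.2 + ((m + 1 : Nat) : Int) * v.2)]) (by omega)]
      rw [List.range_succ_eq_map]
      simp only [List.map_cons, List.map_map, List.append_assoc, List.singleton_append,
        List.cons_append, List.nil_append]
      congr 1
      simp only [List.cons.injEq]
      constructor
      · norm_num
      · apply List.map_congr_left
        intro j _
        simp only [Function.comp_apply, Nat.succ_eq_add_one]
        rw [Prod.mk.injEq]
        constructor <;> (push_cast; ring_nf)
    · constructor
      · dsimp only
        rw [e1, e2]
        exact hin (m + 1) (by omega) (by omega)
      · exact hv

theorem pv_loopUp_run (c v a : Int × Int) (hv : v ≠ (0, 0)) (k : Nat)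
    (hin : ∀ i : Nat, 1 ≤ i → i ≤ k →
      pvInBox c (a.1 + (i : Int) * v.1, a.2 + (i : Int) * v.2) = true)
    (hout : pvInBox c (a.1 + ((k : Int) + 1) * v.1, a.2 + ((k : Int) + 1) * v.2) = false)
    (acc : List (Int × Int)) :
    pvLoopUp c v (acc ++ [a]) a =
      acc ++ (List.range (k + 1)).map
        (fun i : Nat => (a.1 + (i : Int) * v.1, a.2 + (i : Int) * v.2)) := by
  have h0 : pvLoopUp c v (acc ++ [a]) a =
      pvLoopUp c v (acc ++ [a]) (a.1 + ((0 : Nat) : Int) * v.1, a.2 + ((0 : Nat) : Int) * v.2) := by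
    norm_num
  rw [h0, pv_loopUp_eq c v a hv k hin hout k 0 (acc ++ [a]) (by omega)]
  rw [List.range_succ_eq_map]
  simp only [List.map_cons, List.map_map, List.append_assoc, List.singleton_append,
    List.cons_append, List.nil_append]
  congr 2
  · norm_num
  · apply List.map_congr_left
    intro j _
    simp only [Function.comp_apply, Nat.succ_eq_add_one]
    rw [Prod.mk.injEq]
    constructor <;> (push_cast; ring_nf)

theorem pv_pyRange_map (k : Nat) (f : Int → Int × Int) :
    (PySem.List.pyRange 0 ((k : Int) + 1) 1).map f =
      (List.range (k + 1)).map (fun i : Nat => f (i : Int)) := by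
  rw [PySem.List.pyRange_one]
  have h : ((k : Int) + 1 - 0).toNat = k + 1 := by omega
  rw [h, List.map_map]
  apply List.map_congr_left
  intro j _
  simp [Function.comp]

-- ===== VERDICT (by name: the statement is the Claim_ definition above) =====
theorem coords_for_antinodes_spec : Claim_equal_coords_for_antinodes := by
  unfold Claim_equal_coords_for_antinodes
  intro c a1 a2 _ hpre
  unfold Spec_coords_for_antinodes
  show coords_for_antinodes c a1 a2 = coords_for_antinodes_alt c a1 a2
  unfold coords_for_antinodes coords_for_antinodes_alt
  show pvLoopUp c (a2.1 - a1.1, a2.2 - a1.2)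
      (pvLoopDown c (a2.1 - a1.1, a2.2 - a1.2) [a1] a1 ++ [a2]) a2 =
    (PySem.List.pyRange 0 (pvRunLength c.1 c.2 a1.1 a1.2 (-(a2.1 - a1.1)) (-(a2.2 - a1.2)) + 1) 1).map
        (fun i => (a1.1 - i * (a2.1 - a1.1), a1.2 - i * (a2.2 - a1.2))) ++
      (PySem.List.pyRange 0 (pvRunLength c.1 c.2 a2.1 a2.2 (a2.1 - a1.1) (a2.2 - a1.2) + 1) 1).map
        (fun j => (a2.1 + j * (a2.1 - a1.1), a2.2 + j * (a2.2 - a1.2)))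
  by_cases hv : a2.1 - a1.1 = 0 ∧ a2.2 - a1.2 = 0
  · -- zero displacement: by Pre_, the (shared) antenna position is outside the box
    have hvpair : ((a2.1 - a1.1, a2.2 - a1.2) : Int × Int) = (0, 0) := by
      rw [Prod.mk.injEq]; exact hv
    rw [pvLoopDown, dif_neg (by rintro ⟨-, hne⟩; exact hne hvpair)]
    rw [pvLoopUp, dif_neg (by rintro ⟨-, hne⟩; exact hne hvpair)]
    rw [hv.1, hv.2]
    simp [pv_run_zero, PySem.List.pyRange_one]
  · have hvne : ((a2.1 - a1.1, a2.2 - a1.2) : Int × Int) ≠ (0, 0) := by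
      rw [Ne, Prod.mk.injEq]; exact hv
    obtain ⟨hk1nn, hk1in, hk1out⟩ :=
      pv_run_spec c.1 c.2 a1.1 a1.2 (-(a2.1 - a1.1)) (-(a2.2 - a1.2))
        (by rintro ⟨u, w⟩; exact hv ⟨by omega, by omega⟩)
    obtain ⟨hk2nn, hk2in, hk2out⟩ :=
      pv_run_spec c.1 c.2 a2.1 a2.2 (a2.1 - a1.1) (a2.2 - a1.2) hv
    set R1 := pvRunLength c.1 c.2 a1.1 a1.2 (-(a2.1 - a1.1)) (-(a2.2 - a1.2)) with hR1
    set R2 := pvRunLength c.1 c.2 a2.1 a2.2 (a2.1 - a1.1) (a2.2 - a1.2) with hR2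
    have hK1 : ((R1.toNat : Nat) : Int) = R1 := Int.toNat_of_nonneg hk1nn
    have hK2 : ((R2.toNat : Nat) : Int) = R2 := Int.toNat_of_nonneg hk2nn
    have hin1 : ∀ i : Nat, 1 ≤ i → i ≤ R1.toNat →
        pvInBox c (a1.1 - (i : Int) * (a2.1 - a1.1), a1.2 - (i : Int) * (a2.2 - a1.2)) = true := by
      intro i hi1 hiK
      have hii : (1 : Int) ≤ (i : Int) := by exact_mod_cast hi1
      have hik : (i : Int) ≤ R1 := by omega
      obtain ⟨⟨p1, p2⟩, p3, p4⟩ := hk1in (i : Int) hii hik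
      simp only [pvInBox, Bool.and_eq_true, decide_eq_true_eq]
      refine ⟨⟨?_, ?_⟩, ?_, ?_⟩
      · rw [show a1.1 - (i : Int) * (a2.1 - a1.1) = a1.1 + (i : Int) * -(a2.1 - a1.1) from by ring]
        exact p1
      · rw [show a1.1 - (i : Int) * (a2.1 - a1.1) = a1.1 + (i : Int) * -(a2.1 - a1.1) from by ring]
        exact p2
      · rw [show a1.2 - (i : Int) * (a2.2 - a1.2) = a1.2 + (i : Int) * -(a2.2 - a1.2) from by ring]
        exact p3
      · rw [show a1.2 - (i : Int) * (a2.2 - a1.2) = a1.2 + (i : Int) * -(a2.2 - a1.2) from by ring]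
        exact p4
    have hout1 : pvInBox c (a1.1 - ((R1.toNat : Int) + 1) * (a2.1 - a1.1),
        a1.2 - ((R1.toNat : Int) + 1) * (a2.2 - a1.2)) = false := by
      rw [Bool.eq_false_iff]
      intro hb
      simp only [pvInBox, Bool.and_eq_true, decide_eq_true_eq] at hb
      obtain ⟨⟨p1, p2⟩, p3, p4⟩ := hb
      apply hk1out
      rw [← hK1]
      refine ⟨⟨?_, ?_⟩, ?_, ?_⟩
      · rw [show a1.1 + ((R1.toNat : Int) + 1) * -(a2.1 - a1.1)
              = a1.1 - ((R1.toNat : Int) + 1) * (a2.1 - a1.1) from by ring]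
        exact p1
      · rw [show a1.1 + ((R1.toNat : Int) + 1) * -(a2.1 - a1.1)
              = a1.1 - ((R1.toNat : Int) + 1) * (a2.1 - a1.1) from by ring]
        exact p2
      · rw [show a1.2 + ((R1.toNat : Int) + 1) * -(a2.2 - a1.2)
              = a1.2 - ((R1.toNat : Int) + 1) * (a2.2 - a1.2) from by ring]
        exact p3
      · rw [show a1.2 + ((R1.toNat : Int) + 1) * -(a2.2 - a1.2)
              = a1.2 - ((R1.toNat : Int) + 1) * (a2.2 - a1.2) from by ring]
        exact p4
    have hin2 : ∀ i : Nat, 1 ≤ i → i ≤ R2.toNat →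
        pvInBox c (a2.1 + (i : Int) * (a2.1 - a1.1), a2.2 + (i : Int) * (a2.2 - a1.2)) = true := by
      intro i hi1 hiK
      have hii : (1 : Int) ≤ (i : Int) := by exact_mod_cast hi1
      have hik : (i : Int) ≤ R2 := by omega
      obtain ⟨⟨p1, p2⟩, p3, p4⟩ := hk2in (i : Int) hii hik
      simp only [pvInBox, Bool.and_eq_true, decide_eq_true_eq]
      exact ⟨⟨p1, p2⟩, p3, p4⟩
    have hout2 : pvInBox c (a2.1 + ((R2.toNat : Int) + 1) * (a2.1 - a1.1),
        a2.2 + ((R2.toNat : Int) + 1) * (a2.2 - a1.2)) = false := by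
      rw [Bool.eq_false_iff]
      intro hb
      simp only [pvInBox, Bool.and_eq_true, decide_eq_true_eq] at hb
      apply hk2out
      rw [← hK2]
      exact hb
    rw [pv_loopDown_run c (a2.1 - a1.1, a2.2 - a1.2) a1 hvne R1.toNat hin1 hout1]
    rw [pv_loopUp_run c (a2.1 - a1.1, a2.2 - a1.2) a2 hvne R2.toNat hin2 hout2]
    rw [← hK1, ← hK2]
    rw [pv_pyRange_map, pv_pyRange_map]
    simp only [Int.toNat_natCast]
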